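-- pv_equiv track=rewrite | github.com/Code-WSY/GPT-SY | src/scripts/is_prompt_changed.py | is_prompt_changed
-- ===== SOURCE A (Python) =====
-- def is_prompt_changed(chat_history,selected_mode,selected_prompt_title):
--     if len(chat_history) == 0:
--         return True
--     for i in range(len(chat_history)-1, -1, -1):
--         if selected_mode== "ChatCompletion":
--             """
--             对于ChatCompletion格式
--             如果最新的role=system的元素的content与selected_prompt不同，就返回True
--             或者如果没有找到role=system的元素，就返回True
--             其余情况返回False
--             """
--             if chat_history[i]["role"] == "system":
--                 if chat_history[i]["content"] != selected_prompt_title: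
--                     return True
--                 else:
--                     return False
--             #如果没有找到role=system的元素，就返回True
--             if i == 0:
--                 return True
--
--         #单次对话模型
--         elif selected_mode == "Completion":
--             return True
--         elif selected_mode == "Edit":
--             return True
--         elif selected_mode == "Embedding":
--             return True
--         elif selected_mode == "Image.create":
--             return True
--         elif selected_mode == "Image.create_edit":
--             return True
-- ===== SOURCE B (Python) =====
-- # B: after the empty guard, dispatch on the mode once; for ChatCompletion build the
-- # forward list of system-message contents in staged passes and judge its last element
-- # (no reverse early-exit scan, no index loop). Same values as A on Pre_.
-- def is_prompt_changed(chat_history, selected_mode, selected_prompt_title):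
--     if not chat_history:
--         return True
--     if selected_mode == "ChatCompletion":
--         systems = [m.get("content") for m in chat_history if m.get("role") == "system"]
--         if not systems:
--             return True
--         return systems[-1] != selected_prompt_title
--     if selected_mode in {"Completion", "Edit", "Embedding",
--                          "Image.create", "Image.create_edit"}:
--         return True
-- ===== Notes on version B (the rewrite author's own statement) =====
-- stated objective: simpler
-- what changed: B replaces A's descending index loop with per-iteration mode tests and i==0 sentinel by a one-time mode dispatch followed by staged forward passes: it collects the contents of all role=system messages into a list and compares only its last element, instead of scanning backwards with an early exit.
-- outside the precondition, e.g. on is_prompt_changed([{'role': 'user'}], 'Other', 'x'): A returns None, B returns None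
import Mathlib
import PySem

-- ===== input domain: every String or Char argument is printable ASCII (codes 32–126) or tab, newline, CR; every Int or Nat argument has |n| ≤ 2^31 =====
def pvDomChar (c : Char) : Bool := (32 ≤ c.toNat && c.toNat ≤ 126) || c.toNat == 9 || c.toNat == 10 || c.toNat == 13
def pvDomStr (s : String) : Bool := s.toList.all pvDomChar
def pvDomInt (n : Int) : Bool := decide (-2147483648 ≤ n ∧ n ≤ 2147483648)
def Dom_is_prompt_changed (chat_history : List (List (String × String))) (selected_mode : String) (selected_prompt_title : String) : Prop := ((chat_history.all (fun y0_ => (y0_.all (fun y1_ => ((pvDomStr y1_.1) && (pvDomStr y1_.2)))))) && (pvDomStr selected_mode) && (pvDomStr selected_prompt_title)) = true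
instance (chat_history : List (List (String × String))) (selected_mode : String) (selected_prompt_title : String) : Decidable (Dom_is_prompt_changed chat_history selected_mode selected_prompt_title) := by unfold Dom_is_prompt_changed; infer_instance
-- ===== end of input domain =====

-- B dispatches on the mode once and, for ChatCompletion, collects the contents of all
-- role=system messages by staged forward passes and judges the last one, instead of A's
-- descending index loop with early exit (objective: simpler); same values on Pre_.

-- ===== PORT A =====
-- Python dict msg["k"] is an assoc list; lookup = first match (List.lookup).
-- Under Pre_ every key A dereferences is present, so the getD "" default never decides.
-- The descending for-loop over range(len-1, -1, -1) is the structural recursion aGo on the index i;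
-- Python's fall-off-the-end `None` (unknown mode) is outside Pre_ and ported as `true`.
def aGo (chat_history : List (List (String × String))) (selected_mode : String) (selected_prompt_title : String) : Nat → Bool
  | 0 =>
    if selected_mode = "ChatCompletion" then
      if ((chat_history.getD 0 []).lookup "role").getD "" = "system" then
        decide (((chat_history.getD 0 []).lookup "content").getD "" ≠ selected_prompt_title)
      else true  -- the i == 0 branch of A
    else if selected_mode = "Completion" then true
    else if selected_mode = "Edit" then true
    else if selected_mode = "Embedding" then true
    else if selected_mode = "Image.create" then true
    else if selected_mode = "Image.create_edit" then true
    else true  -- Python returns None here (unknown mode); excluded by Pre_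
  | j + 1 =>
    if selected_mode = "ChatCompletion" then
      if ((chat_history.getD (j+1) []).lookup "role").getD "" = "system" then
        decide (((chat_history.getD (j+1) []).lookup "content").getD "" ≠ selected_prompt_title)
      else aGo chat_history selected_mode selected_prompt_title j
    else if selected_mode = "Completion" then true
    else if selected_mode = "Edit" then true
    else if selected_mode = "Embedding" then true
    else if selected_mode = "Image.create" then true
    else if selected_mode = "Image.create_edit" then true
    else aGo chat_history selected_mode selected_prompt_title j

def is_prompt_changed (chat_history : List (List (String × String))) (selected_mode : String) (selected_prompt_title : String) : Bool :=
  if chat_history.length = 0 then true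
  else aGo chat_history selected_mode selected_prompt_title (chat_history.length - 1)

-- ===== PORT B =====
-- Source B's m.get("k") is (m.lookup "k") : Option String; the comprehension is filter-then-map,
-- systems[-1] on a non-empty list is getLast?, and `None != title` is `none ≠ some title`.
-- Python B returns None on an unknown mode with non-empty history; outside Pre_, ported as `true`.
def is_prompt_changed_alt (chat_history : List (List (String × String))) (selected_mode : String) (selected_prompt_title : String) : Bool :=
  if chat_history.isEmpty then true
  else if selected_mode = "ChatCompletion" then
    let systems := (chat_history.filter (fun m => (m.lookup "role") == some "system")).map (fun m => m.lookup "content")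
    match systems.getLast? with
    | none => true
    | some c => decide (c ≠ some selected_prompt_title)
  else if ["Completion", "Edit", "Embedding", "Image.create", "Image.create_edit"].contains selected_mode then true
  else true  -- Python B returns None here; excluded by Pre_

-- ===== PRECONDITION & SPEC =====
-- Pre_ excludes exactly the inputs where the Python A does not return a bool: a KeyError
-- (in ChatCompletion mode, a scanned message after the last system message lacking "role",
-- or that system message lacking "content"), and the non-empty-history unknown-mode case,
-- where A falls off the end and returns None instead of a bool (B returns None there too).
def Pre_is_prompt_changed (chat_history : List (List (String × String))) (selected_mode : String) (selected_prompt_title : String) : Prop :=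
  chat_history = [] ∨
  (selected_mode = "ChatCompletion" ∧
    (∀ msg ∈ chat_history.reverse.takeWhile (fun msg => !((msg.lookup "role") == some "system")),
        (msg.lookup "role") ≠ none) ∧
    (∀ msg ∈ (chat_history.reverse.find? (fun msg => (msg.lookup "role") == some "system")).toList,
        (msg.lookup "content") ≠ none)) ∨
  selected_mode ∈ ["Completion", "Edit", "Embedding", "Image.create", "Image.create_edit"]
instance (chat_history : List (List (String × String))) (selected_mode : String) (selected_prompt_title : String) : Decidable (Pre_is_prompt_changed chat_history selected_mode selected_prompt_title) := by unfold Pre_is_prompt_changed; infer_instance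

def pvWitness_is_prompt_changed : (List (List (String × String))) × String × String :=
  ([[("role", "user")], [("role", "system"), ("content", "hi")]], "ChatCompletion", "hi")

def Spec_is_prompt_changed (chat_history : List (List (String × String))) (selected_mode : String) (selected_prompt_title : String) (out : Bool) : Prop := out = is_prompt_changed_alt chat_history selected_mode selected_prompt_title
instance (chat_history : List (List (String × String))) (selected_mode : String) (selected_prompt_title : String) (out : Bool) : Decidable (Spec_is_prompt_changed chat_history selected_mode selected_prompt_title out) := by unfold Spec_is_prompt_changed; infer_instance

-- ===== CLAIM (what is proved, stated in full; the proofs are below) =====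
def Claim_equal_is_prompt_changed : Prop := ∀ (chat_history : List (List (String × String))) (selected_mode : String) (selected_prompt_title : String), Dom_is_prompt_changed chat_history selected_mode selected_prompt_title → Pre_is_prompt_changed chat_history selected_mode selected_prompt_title → Spec_is_prompt_changed chat_history selected_mode selected_prompt_title (is_prompt_changed chat_history selected_mode selected_prompt_title)

-- ===== LEMMAS AND PROOFS =====

lemma find?_eq_head?_filter' {α : Type} (l : List α) (p : α → Bool) :
    l.find? p = (l.filter p).head? := by
  induction l with
  | nil => rfl
  | cons a t ih =>
    simp only [List.find?_cons, List.filter_cons]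
    cases h : p a
    · simpa using ih
    · simp

-- A's scan from index i downwards computes find? over the reversed (i+1)-prefix.
lemma aGo_chat (ch : List (List (String × String))) (t : String) :
    ∀ i, i < ch.length →
      aGo ch "ChatCompletion" t i =
        (match (ch.take (i+1)).reverse.find? (fun msg => (msg.lookup "role") == some "system") with
         | some msg => decide (((msg.lookup "content").getD "") ≠ t)
         | none => true) := by
  intro i
  induction i with
  | zero =>
    intro h
    have h0 : ch.take 1 = [ch[0]] := by
      cases ch with
      | nil => simp at h
      | cons a l => simp
    simp only [aGo]; rw [h0]
    simp only [List.reverse_cons, List.reverse_nil, List.nil_append, List.find?]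
    have hg : ch.getD 0 [] = ch[0] := by
      simp [List.getD, List.getElem?_eq_getElem h]
    rw [hg]
    by_cases hr : ((ch[0].lookup "role").getD "" = "system")
    · have hb : ((ch[0].lookup "role") == some "system") = true := by
        cases hl : ch[0].lookup "role" with
        | none => simp [hl] at hr
        | some v => simp [hl] at hr ⊢; simpa [hl] using hr
      simp [hr, hb]
    · have hb : ((ch[0].lookup "role") == some "system") = false := by
        cases hl : ch[0].lookup "role" with
        | none => simp
        | some v => simp [hl] at hr ⊢; simpa using hr
      simp [hr, hb]
  | succ j ih =>
    intro h
    have hj : j < ch.length := Nat.lt_of_succ_lt h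
    have hstep : ch.take (j+2) = ch.take (j+1) ++ [ch[j+1]] := by
      rw [List.take_add_one, List.getElem?_eq_getElem h]
      rfl
    simp only [aGo]; rw [hstep]
    simp only [List.reverse_append, List.reverse_cons, List.reverse_nil, List.nil_append,
      List.cons_append, List.find?]
    have hg : ch.getD (j+1) [] = ch[j+1] := by
      simp [List.getD, List.getElem?_eq_getElem h]
    rw [hg]
    by_cases hr : ((ch[j+1].lookup "role").getD "" = "system")
    · have hb : ((ch[j+1].lookup "role") == some "system") = true := by
        cases hl : ch[j+1].lookup "role" with
        | none => simp [hl] at hr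
        | some v => simp [hl] at hr ⊢; simpa [hl] using hr
      simp [hr, hb]
    · have hb : ((ch[j+1].lookup "role") == some "system") = false := by
        cases hl : ch[j+1].lookup "role" with
        | none => simp
        | some v => simp [hl] at hr ⊢; simpa using hr
      simp only [hr, if_false, hb]
      simpa using ih hj

-- for any mode other than the six named ones, A's loop falls through to true
lemma aGo_other (ch : List (List (String × String))) (sm t : String)
    (h1 : sm ≠ "ChatCompletion") (h2 : sm ≠ "Completion") (h3 : sm ≠ "Edit")
    (h4 : sm ≠ "Embedding") (h5 : sm ≠ "Image.create") (h6 : sm ≠ "Image.create_edit") :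
    ∀ i, aGo ch sm t i = true := by
  intro i
  induction i with
  | zero => simp only [aGo]; simp [h1, h2, h3, h4, h5, h6]
  | succ j ih => simp only [aGo]; simp [h1, h2, h3, h4, h5, h6, ih]

-- B's staged passes compute the content lookup of the reverse-find, as an Option
lemma alt_systems (ch : List (List (String × String))) :
    ((ch.filter (fun m => (m.lookup "role") == some "system")).map (fun m => m.lookup "content")).getLast? =
      (ch.reverse.find? (fun m => (m.lookup "role") == some "system")).map (fun m => m.lookup "content") := by
  rw [List.getLast?_map, find?_eq_head?_filter', List.filter_reverse, List.head?_reverse]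

lemma ports_eq (ch : List (List (String × String))) (sm t : String)
    (hpre : Pre_is_prompt_changed ch sm t) :
    is_prompt_changed ch sm t = is_prompt_changed_alt ch sm t := by
  unfold is_prompt_changed is_prompt_changed_alt
  by_cases hnil : ch = []
  · simp [hnil]
  · have hlen : ch.length ≠ 0 := by simpa using hnil
    have hemp : ch.isEmpty = false := by simpa using hnil
    rw [if_neg hlen, hemp]
    simp only [Bool.false_eq_true, if_false]
    by_cases hc : sm = "ChatCompletion"
    · subst hc
      have hlt : ch.length - 1 < ch.length := Nat.sub_lt (Nat.pos_of_ne_zero hlen) one_pos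
      have htake : ch.take (ch.length - 1 + 1) = ch := by
        rw [Nat.sub_add_cancel (Nat.pos_of_ne_zero hlen)]
        exact List.take_length
      rw [if_pos rfl, aGo_chat ch t (ch.length - 1) hlt, htake, alt_systems]
      rcases hpre with h | ⟨_, _, hcont⟩ | h
      · exact absurd h hnil
      · cases hf : ch.reverse.find? (fun m => (m.lookup "role") == some "system") with
        | none => rfl
        | some msg =>
          have hc2 : msg.lookup "content" ≠ none := by
            apply hcont; simp [hf]
          cases hl : msg.lookup "content" with
          | none => exact absurd hl hc2
          | some c => simp [Option.map, hl]
      · simp at h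
    · rw [if_neg hc]
      by_cases hk : sm ∈ ["Completion", "Edit", "Embedding", "Image.create", "Image.create_edit"]
      · have hkc : (["Completion", "Edit", "Embedding", "Image.create", "Image.create_edit"].contains sm) = true := by
          simpa [List.contains_eq_mem] using hk
        rw [hkc]
        simp only [if_true]
        simp only [List.mem_cons, List.not_mem_nil, or_false] at hk
        cases hi : ch.length - 1 with
        | zero => simp only [aGo]; rcases hk with h | h | h | h | h | h <;> simp_all
        | succ j => simp only [aGo]; rcases hk with h | h | h | h | h | h <;> simp_all
      · simp only [List.mem_cons, List.not_mem_nil, or_false, not_or] at hk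
        obtain ⟨h2, h3, h4, h5, h6⟩ := hk
        rw [aGo_other ch sm t hc h2 h3 h4 h5 h6]
        split <;> rfl

-- ===== VERDICT (by name: the statement is the Claim_ definition above) =====
theorem is_prompt_changed_spec : Claim_equal_is_prompt_changed := by
  intro ch sm t _ hpre
  exact ports_eq ch sm t hpre
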